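-- pv_equiv track=rewrite | github.com/Wamedina/Tesis-Magister | Backup Codes/SUBTE/Preparacion_S.py | Separador_Variable_S
-- ===== SOURCE A (Python) =====
-- def Trabajando_X_S (X_1_INT):
--
--     lista_final = list()
--     for columnas in range(len(X_1_INT[0])):
--         lista_aux = list()
--         for filas in X_1_INT:
--             lista_aux.append(filas[columnas])
--         lista_final.append(lista_aux)
--
--     return lista_final
--
-- def Separador_Variable_S(X_1_INT):
--     lista_final = list()
--     X_1 = Trabajando_X_S (X_1_INT)
--     for t in X_1:
--         dp = 0
--         lista_aux = list()
--         for columna in t: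
--             if columna == 1:
--                 lista_aux.append(dp)
--             dp += 1
--         lista_final.append(lista_aux)
--     return lista_final
-- ===== SOURCE B (Python) =====
-- def Separador_Variable_S(X_1_INT):
--     # Single row-major pass: bucket each row index into the columns where the
--     # entry is 1, instead of materializing the transpose and scanning it.
--     ncols = len(X_1_INT[0])
--     lista_final = [[] for _ in range(ncols)]
--     for i, row in enumerate(X_1_INT):
--         for j in range(ncols):
--             if row[j] == 1:
--                 lista_final[j].append(i)
--     return lista_final
-- ===== Notes on version B (the rewrite author's own statement) =====
-- stated objective: simpler
-- what changed: B drops the transpose helper and buckets row indices into per-column lists in one row-major pass, instead of building the transposed matrix and then scanning each column with a manual position counter (no transposed copy, cache-friendly row-major traversal).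
import Mathlib
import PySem

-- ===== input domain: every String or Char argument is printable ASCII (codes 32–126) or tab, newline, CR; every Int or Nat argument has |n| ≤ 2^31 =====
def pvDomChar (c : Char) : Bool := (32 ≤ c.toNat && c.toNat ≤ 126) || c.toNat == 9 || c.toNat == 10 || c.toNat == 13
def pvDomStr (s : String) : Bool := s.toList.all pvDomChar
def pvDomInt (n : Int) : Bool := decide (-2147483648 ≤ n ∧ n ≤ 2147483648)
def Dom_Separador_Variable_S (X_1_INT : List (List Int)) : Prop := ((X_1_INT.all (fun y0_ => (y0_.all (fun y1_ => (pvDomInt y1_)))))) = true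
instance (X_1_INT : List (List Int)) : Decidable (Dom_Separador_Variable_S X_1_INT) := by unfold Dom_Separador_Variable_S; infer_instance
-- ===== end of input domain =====

-- B replaces A's transpose-then-scan with a single row-major pass that buckets each
-- row index into the columns holding a 1 (objective: simpler — no transposed copy).

-- ===== PORT A =====
-- helper: builds the transposed matrix (column j = [row[j] for row in X_1_INT])
def Trabajando_X_S (X_1_INT : List (List Int)) : List (List Int) :=
  (PySem.List.pyRange 0 ((PySem.List.pyGetD X_1_INT 0 []).length : Int) 1).foldl
    (fun lista_final columnas =>
      lista_final ++ [X_1_INT.foldl (fun lista_aux filas =>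
        lista_aux ++ [PySem.List.pyGetD filas columnas 0]) []]) []

def Separador_Variable_S (X_1_INT : List (List Int)) : List (List Int) :=
  (Trabajando_X_S X_1_INT).foldl
    (fun lista_final t =>
      lista_final ++
        [(t.foldl (fun (st : Int × List Int) columna =>
            (st.1 + 1, if columna == 1 then st.2 ++ [st.1] else st.2)) (0, [])).2]) []

-- ===== PORT B =====
def Separador_Variable_S_alt (X_1_INT : List (List Int)) : List (List Int) :=
  let ncols : Int := ((PySem.List.pyGetD X_1_INT 0 []).length : Int)
  (PySem.List.enumerate X_1_INT 0).foldl
    (fun lista_final p =>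
      (PySem.List.pyRange 0 ncols 1).foldl
        (fun lf j =>
          if PySem.List.pyGetD p.2 j 0 == 1 then
            -- lista_final[j].append(i); j comes from range(ncols), so 0 ≤ j and .toNat is exact
            lf.modify j.toNat (fun b => b ++ [p.1])
          else lf)
        lista_final)
    ((PySem.List.pyRange 0 ncols 1).map (fun _ => ([] : List Int)))

-- ===== PRECONDITION & SPEC =====
-- Pre_ excludes exactly the inputs where Python A raises IndexError: the empty matrix
-- (X_1_INT[0]) and ragged matrices with a row shorter than the first row (filas[columnas]).
def Pre_Separador_Variable_S (X_1_INT : List (List Int)) : Prop :=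
  X_1_INT ≠ [] ∧ ∀ row ∈ X_1_INT, (X_1_INT.headD []).length ≤ row.length
instance (X_1_INT : List (List Int)) : Decidable (Pre_Separador_Variable_S X_1_INT) := by
  unfold Pre_Separador_Variable_S; infer_instance
def pvWitness_Separador_Variable_S : List (List Int) := [[1, 0], [0, 1], [1, 1]]

def Spec_Separador_Variable_S (X_1_INT : List (List Int)) (out : List (List Int)) : Prop := out = Separador_Variable_S_alt X_1_INT
instance (X_1_INT : List (List Int)) (out : List (List Int)) : Decidable (Spec_Separador_Variable_S X_1_INT out) := by unfold Spec_Separador_Variable_S; infer_instance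

-- ===== CLAIM (what is proved, stated in full; the proofs are below) =====
def Claim_equal_Separador_Variable_S : Prop := ∀ (X_1_INT : List (List Int)), Dom_Separador_Variable_S X_1_INT → Pre_Separador_Variable_S X_1_INT → Spec_Separador_Variable_S X_1_INT (Separador_Variable_S X_1_INT)

-- ===== LEMMAS AND PROOFS =====

-- positions (counted from d) of the entries equal to 1
def hits : List Int → Int → List Int
  | [], _ => []
  | c :: t, d => (if c == 1 then [d] else []) ++ hits t (d + 1)

lemma A_inner (t : List Int) : ∀ (d : Int) (l : List Int),
    (t.foldl (fun (st : Int × List Int) columna =>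
        (st.1 + 1, if columna == 1 then st.2 ++ [st.1] else st.2)) (d, l)).2
      = l ++ hits t d := by
  induction t with
  | nil => intro d l; simp [hits]
  | cons c t ih =>
    intro d l
    simp only [List.foldl_cons, hits]
    rw [ih]
    by_cases h : c == 1 <;> simp [h]

lemma A_eq (X : List (List Int)) :
    Separador_Variable_S X =
      (List.range (PySem.List.pyGetD X 0 []).length).map
        (fun (k : Nat) => hits (X.map (fun r => PySem.List.pyGetD r (k : Int) 0)) 0) := by
  unfold Separador_Variable_S Trabajando_X_S
  simp only [PySem.List.foldl_append_singleton_eq_map, List.nil_append]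
  rw [PySem.List.pyRange_zero_natCast]
  simp only [List.map_map]
  refine List.map_congr_left (fun k _ => ?_)
  simp only [Function.comp_apply]
  rw [A_inner]
  simp

lemma fold_modify_getElem? (upd : Nat → Bool) (i : Int) :
    ∀ (m : Nat) (bs : List (List Int)) (k : Nat),
      ((List.range m).foldl
          (fun bs j => if upd j then bs.modify j (fun b => b ++ [i]) else bs) bs)[k]?
        = if k < m ∧ upd k then (bs[k]?).map (fun b => b ++ [i]) else bs[k]? := by
  intro m
  induction m with
  | zero => intro bs k; simp
  | succ m ih =>
    intro bs k
    rw [List.range_succ, List.foldl_append, List.foldl_cons, List.foldl_nil]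
    by_cases hm : upd m
    · rw [if_pos hm]
      by_cases hk : k = m
      · subst hk
        rw [List.getElem?_modify_eq, ih]
        simp [hm, Option.map_eq_map]
      · rw [List.getElem?_modify_ne _ _ (Ne.symm hk), ih]
        by_cases hlt : k < m
        · have h1 : k < m + 1 := by omega
          simp [hlt, h1]
        · have h1 : ¬ (k < m + 1) := by omega
          simp [hlt, h1]
    · rw [if_neg hm, ih]
      by_cases hk : k = m
      · subst hk; simp [hm]
      · by_cases hlt : k < m
        · have h1 : k < m + 1 := by omega
          simp [hlt, h1]
        · have h1 : ¬ (k < m + 1) := by omega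
          simp [hlt, h1]

lemma inner_eq (upd : Nat → Bool) (i : Int) (n : Nat) (f : Nat → List Int) :
    (List.range n).foldl
        (fun bs j => if upd j then bs.modify j (fun b => b ++ [i]) else bs)
        ((List.range n).map f)
      = (List.range n).map (fun k => if upd k then f k ++ [i] else f k) := by
  apply List.ext_getElem?
  intro k
  rw [fold_modify_getElem?]
  by_cases hk : k < n
  · simp [hk]
    by_cases hu : upd k <;> simp [hu]
  · have h1 : ((List.range n).map f)[k]? = none :=
      List.getElem?_eq_none (by simp; omega)
    have h2 : ((List.range n).map (fun k => if upd k then f k ++ [i] else f k))[k]? = none :=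
      List.getElem?_eq_none (by simp; omega)
    simp [hk]

lemma B_outer (n : Nat) :
    ∀ (rows : List (List Int)) (i : Int) (f : Nat → List Int),
      (PySem.List.enumerate rows i).foldl
          (fun lista_final p =>
            (List.range n).foldl
              (fun lf (j : Nat) =>
                if PySem.List.pyGetD p.2 (j : Int) 0 == 1 then
                  lf.modify j (fun b => b ++ [p.1])
                else lf)
              lista_final)
          ((List.range n).map f)
        = (List.range n).map
            (fun (k : Nat) =>
              f k ++ hits (rows.map (fun r => PySem.List.pyGetD r (k : Int) 0)) i) := by
  intro rows
  induction rows with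
  | nil =>
    intro i f
    rw [PySem.List.enumerate_nil, List.foldl_nil]
    refine List.map_congr_left (fun k _ => ?_)
    simp [hits]
  | cons r rows ih =>
    intro i f
    rw [PySem.List.enumerate_cons]
    simp only [List.foldl_cons]
    rw [inner_eq (fun j => PySem.List.pyGetD r (j : Int) 0 == 1) i n f, ih]
    refine List.map_congr_left (fun k _ => ?_)
    simp only [List.map_cons, hits]
    by_cases h : (PySem.List.pyGetD r (k : Int) 0 == 1) = true
    · rw [if_pos h, if_pos h]
      simp
    · rw [if_neg h, if_neg h]
      simp

lemma B_eq (X : List (List Int)) :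
    Separador_Variable_S_alt X =
      (List.range (PySem.List.pyGetD X 0 []).length).map
        (fun (k : Nat) => hits (X.map (fun r => PySem.List.pyGetD r (k : Int) 0)) 0) := by
  unfold Separador_Variable_S_alt
  simp only [PySem.List.pyRange_zero_natCast, List.foldl_map, List.map_map,
    Function.comp_def, Int.toNat_natCast]
  rw [B_outer]
  refine List.map_congr_left (fun k _ => ?_)
  simp

lemma ports_agree (X : List (List Int)) :
    Separador_Variable_S X = Separador_Variable_S_alt X := by
  rw [A_eq, B_eq]

-- ===== VERDICT (by name: the statement is the Claim_ definition above) =====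
theorem Separador_Variable_S_spec : Claim_equal_Separador_Variable_S := by
  intro X _ _
  unfold Spec_Separador_Variable_S
  exact ports_agree X
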